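-- pv_equiv track=rewrite | github.com/Enzo-Laborde/AutoSeqTools | AStools.py | checkMorphismEntry
-- ===== SOURCE A (Python) =====
-- def checkMorphismEntry(seq, c, d, start, maxIter=-1):
-- 	"""
-- 	Check if other occurence of word 'c' in sequence 'seq' have the same image 'd'.
-- 	'maxIter' is the number of check it and 'start' specify the position of the word c in seq.
-- 	If all occurence of c have the same image, return the number of occurences, otherwise return the negavite value (allow to know which image is not good).
-- 	"""
--
-- 	match = 1  # If match == 0, then c antecedent have two distinct images => return 0
-- 	wordSize = len(c)
-- 	mapSize = len(d)
-- 	unif = int(mapSize / wordSize)  # Number of times images is greater than antecedent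
--
-- 	j = 0
-- 	# While they are only one imag, still left test to do, c appears further ...
-- 	while match > 0 and j != maxIter and start != -1:
--
-- 		# search the new occurence of c in seq
-- 		# Why start + wordSize - (start % wordSize) ? Because it search the 'good word' after the one readed : an antecedent is every wordSize characters, from the beginning
-- 		# If the occurence of c found is not a 'good word', (start % wordSize) will be different from 0
-- 		start = seq.find(c, start + wordSize - (start % wordSize))
--
-- 		# If the new occurence of c is found, if it is a 'good word' (not overlaping two word) and it's image is in seq length
-- 		if start != -1 and not start % wordSize and start * unif + mapSize <= len(seq):
--
-- 			# If the image is d, then one more occurence was found, otherwise one antecedent have two images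
-- 			if d == seq[start * unif:start * unif + mapSize]:
-- 				match += 1
-- 			else:
-- 				match *= -1
--
-- 			j += 1
--
--
-- 	return match
-- ===== SOURCE B (Python) =====
-- def checkMorphismEntry(seq, c, d, start, maxIter=-1):
-- 	"""
-- 	Direct scan over word-aligned positions: an antecedent sits every wordSize
-- 	characters, so instead of searching with find we step through the aligned
-- 	positions after 'start' and compare the word there with 'c' directly.
-- 	"""
-- 	match = 1
-- 	wordSize = len(c)
-- 	mapSize = len(d)
-- 	unif = int(mapSize / wordSize)
--
-- 	if start == -1:
-- 		return match
--
-- 	# first word-aligned position strictly after the word containing 'start'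
-- 	p = start - start % wordSize + wordSize
--
-- 	j = 0
-- 	while j != maxIter and p + wordSize <= len(seq):
-- 		if seq[p:p + wordSize] == c and p * unif + mapSize <= len(seq):
-- 			if d == seq[p * unif:p * unif + mapSize]:
-- 				match += 1
-- 				j += 1
-- 			else:
-- 				return -match
-- 		p += wordSize
-- 	return match
-- ===== Notes on version B (the rewrite author's own statement) =====
-- stated objective: simpler
-- what changed: Replaces the repeated seq.find substring search plus modulo re-alignment with a direct scan over word-aligned positions stepping by wordSize, comparing the slice at each position; Pre_ excludes c = "" (A raises ZeroDivisionError) and start < -1, outside the documented domain (start is a position of c in seq, -1 the sentinel), where A's value comes from str.find reinterpreting the negative search position from the string end.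
-- outside the precondition, e.g. on checkMorphismEntry('ababab', 'ab', 'ab', -5, -1): A returns 3, B returns 5
import Mathlib
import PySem

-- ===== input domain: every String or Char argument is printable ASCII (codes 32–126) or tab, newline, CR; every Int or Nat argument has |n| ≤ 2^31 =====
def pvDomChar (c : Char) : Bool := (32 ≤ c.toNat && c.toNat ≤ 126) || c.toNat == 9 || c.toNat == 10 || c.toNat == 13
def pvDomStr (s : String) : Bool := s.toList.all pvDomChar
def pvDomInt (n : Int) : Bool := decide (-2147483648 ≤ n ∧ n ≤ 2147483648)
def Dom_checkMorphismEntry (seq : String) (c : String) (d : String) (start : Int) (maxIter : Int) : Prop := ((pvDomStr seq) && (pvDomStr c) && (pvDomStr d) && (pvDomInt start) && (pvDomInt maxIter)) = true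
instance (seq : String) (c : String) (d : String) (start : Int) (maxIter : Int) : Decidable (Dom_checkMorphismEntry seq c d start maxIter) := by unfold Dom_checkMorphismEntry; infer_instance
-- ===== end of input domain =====

-- B replaces the repeated `seq.find` substring search by a direct scan over word-aligned
-- positions stepping by wordSize (objective: simpler single linear scan).
-- Pre_ excludes c = "" (ZeroDivisionError) and start < -1 (outside the documented domain).


-- ===== PORT A =====
-- A's while loop as fuel recursion; fuel s.length + 2 is enough: each executed iteration
-- strictly increases the found index, and a find miss ends the loop on the next test.
def pvLoopA (s cL dL : List Char) (maxIter : Int) : Nat → Int → Int → Int → Int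
  | 0, m, _, _ => m
  | fuel+1, m, j, start =>
    if 0 < m ∧ j ≠ maxIter ∧ start ≠ -1 then
      -- start = seq.find(c, start + wordSize - (start % wordSize))
      let st := PySem.Chars.findFrom s cL (start + (cL.length : Int) - PySem.Int.mod start (cL.length : Int)) none
      if st ≠ -1 ∧ PySem.Int.mod st (cL.length : Int) = 0 ∧
          st * PySem.Int.truncdiv (dL.length : Int) (cL.length : Int) + (dL.length : Int) ≤ (s.length : Int) then
        if dL = PySem.List.slice s (some (st * PySem.Int.truncdiv (dL.length : Int) (cL.length : Int)))
            (some (st * PySem.Int.truncdiv (dL.length : Int) (cL.length : Int) + (dL.length : Int))) then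
          pvLoopA s cL dL maxIter fuel (m + 1) (j + 1) st
        else
          pvLoopA s cL dL maxIter fuel (m * (-1)) (j + 1) st
      else
        pvLoopA s cL dL maxIter fuel m j st
    else m

def checkMorphismEntry (seq : String) (c : String) (d : String) (start : Int) (maxIter : Int) : Int :=
  pvLoopA seq.toList c.toList d.toList maxIter (seq.toList.length + 2) 1 0 start

-- ===== PORT B =====
-- Source B's while loop over word-aligned positions p, stepping by wordSize.
-- The conjunct 0 < cL.length is only a termination guard (Pre_ gives it).
def pvLoopB (s cL dL : List Char) (maxIter m j p : Int) : Int :=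
  if h : j ≠ maxIter ∧ p + (cL.length : Int) ≤ (s.length : Int) ∧ 0 < cL.length then
    if PySem.List.slice s (some p) (some (p + (cL.length : Int))) = cL ∧
        p * PySem.Int.truncdiv (dL.length : Int) (cL.length : Int) + (dL.length : Int) ≤ (s.length : Int) then
      if dL = PySem.List.slice s (some (p * PySem.Int.truncdiv (dL.length : Int) (cL.length : Int)))
          (some (p * PySem.Int.truncdiv (dL.length : Int) (cL.length : Int) + (dL.length : Int))) then
        pvLoopB s cL dL maxIter (m + 1) (j + 1) (p + (cL.length : Int))
      else -m
    else pvLoopB s cL dL maxIter m j (p + (cL.length : Int))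
  else m
termination_by ((s.length : Int) + (cL.length : Int) - p).toNat
decreasing_by all_goals omega

def checkMorphismEntry_alt (seq : String) (c : String) (d : String) (start : Int) (maxIter : Int) : Int :=
  let s := seq.toList
  let cL := c.toList
  if start = -1 then 1
  else
    -- p = start - start % wordSize + wordSize: first aligned position after start's word
    pvLoopB s cL d.toList maxIter 1 0 (start - PySem.Int.mod start (cL.length : Int) + (cL.length : Int))

-- ===== PRECONDITION & SPEC =====
-- Pre_ excludes c = "" (A raises ZeroDivisionError in int(mapSize / wordSize)) and start < -1,
-- outside the documented domain (start is a position of the word c in seq, -1 the sentinel),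
-- where A's value is an artefact of str.find reinterpreting the negative search position
-- relative to the string end.
def Pre_checkMorphismEntry (seq : String) (c : String) (d : String) (start : Int) (maxIter : Int) : Prop :=
  c ≠ "" ∧ -1 ≤ start
instance (seq : String) (c : String) (d : String) (start : Int) (maxIter : Int) : Decidable (Pre_checkMorphismEntry seq c d start maxIter) := by unfold Pre_checkMorphismEntry; infer_instance

def pvWitness_checkMorphismEntry : String × String × String × Int × Int := ("abab", "ab", "ab", 0, -1)

def Spec_checkMorphismEntry (seq : String) (c : String) (d : String) (start : Int) (maxIter : Int) (out : Int) : Prop := out = checkMorphismEntry_alt seq c d start maxIter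
instance (seq : String) (c : String) (d : String) (start : Int) (maxIter : Int) (out : Int) : Decidable (Spec_checkMorphismEntry seq c d start maxIter out) := by unfold Spec_checkMorphismEntry; infer_instance

-- ===== CLAIM (what is proved, stated in full; the proofs are below) =====
def Claim_equal_checkMorphismEntry : Prop := ∀ (seq : String) (c : String) (d : String) (start : Int) (maxIter : Int), Dom_checkMorphismEntry seq c d start maxIter → Pre_checkMorphismEntry seq c d start maxIter → Spec_checkMorphismEntry seq c d start maxIter (checkMorphismEntry seq c d start maxIter)


-- ===== LEMMAS AND PROOFS =====

-- proof-only Nat-indexed version of B's loop (p ≥ 0 inside Pre_)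
def pvLoopBN (s cL dL : List Char) (maxIter m j : Int) (p : Nat) : Int :=
  if h : j ≠ maxIter ∧ p + cL.length ≤ s.length ∧ 0 < cL.length then
    if PySem.List.slice s (some (p : Int)) (some ((p : Int) + (cL.length : Int))) = cL ∧
        (p : Int) * PySem.Int.truncdiv (dL.length : Int) (cL.length : Int) + (dL.length : Int) ≤ (s.length : Int) then
      if dL = PySem.List.slice s (some ((p : Int) * PySem.Int.truncdiv (dL.length : Int) (cL.length : Int)))
          (some ((p : Int) * PySem.Int.truncdiv (dL.length : Int) (cL.length : Int) + (dL.length : Int))) then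
        pvLoopBN s cL dL maxIter (m + 1) (j + 1) (p + cL.length)
      else -m
    else pvLoopBN s cL dL maxIter m j (p + cL.length)
  else m
termination_by s.length - p
decreasing_by all_goals omega

-- the Int-indexed port loop agrees with the Nat-indexed proof loop at nonnegative positions
theorem pvLoopB_eq_nat (s cL dL : List Char) (maxIter : Int) :
    ∀ (k : Nat) (m j : Int) (pn : Nat), s.length - pn ≤ k →
      pvLoopB s cL dL maxIter m j ((pn : Nat) : Int) = pvLoopBN s cL dL maxIter m j pn := by
  intro k
  induction k with
  | zero =>
    intro m j pn hk
    rw [pvLoopB, pvLoopBN, dif_neg (by rintro ⟨_, h2, h3⟩; omega),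
      dif_neg (by rintro ⟨_, h2, h3⟩; omega)]
  | succ k ih =>
    intro m j pn hk
    by_cases hg : j ≠ maxIter ∧ pn + cL.length ≤ s.length ∧ 0 < cL.length
    · have hgI : j ≠ maxIter ∧ ((pn : Nat) : Int) + (cL.length : Int) ≤ (s.length : Int) ∧ 0 < cL.length := by
        refine ⟨hg.1, by exact_mod_cast hg.2.1, hg.2.2⟩
      rw [pvLoopB, pvLoopBN, dif_pos hgI, dif_pos hg]
      have hcast : ((pn : Nat) : Int) + (cL.length : Int) = (((pn + cL.length : Nat) : Nat) : Int) := by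
        push_cast; ring
      have ihk : s.length - (pn + cL.length) ≤ k := by omega
      split_ifs with h1 h2
      · rw [hcast]; exact ih (m + 1) (j + 1) (pn + cL.length) ihk
      · rfl
      · rw [hcast]; exact ih m j (pn + cL.length) ihk
    · have hgI : ¬ (j ≠ maxIter ∧ ((pn : Nat) : Int) + (cL.length : Int) ≤ (s.length : Int) ∧ 0 < cL.length) := by
        rintro ⟨h1, h2, h3⟩; exact hg ⟨h1, by exact_mod_cast h2, h3⟩
      rw [pvLoopB, pvLoopBN, dif_neg hgI, dif_neg hg]

-- further proof-only helpers
def pvAlign (w q : Nat) : Nat := q + (w - q % w) % w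

-- the condition B's loop body tests at an aligned position x
def pvOcc (s cL dL : List Char) (x : Nat) : Prop :=
  PySem.List.slice s (some (x : Int)) (some ((x : Int) + (cL.length : Int))) = cL ∧
  (x : Int) * PySem.Int.truncdiv (dL.length : Int) (cL.length : Int) + (dL.length : Int) ≤ (s.length : Int)

theorem pvAlign_ge (w q : Nat) : q ≤ pvAlign w q := Nat.le_add_right _ _

theorem pvAlign_lt (w q : Nat) (hw : 0 < w) : pvAlign w q < q + w := by
  have := Nat.mod_lt (w - q % w) hw
  unfold pvAlign; omega

theorem pvAlign_dvd (w q : Nat) (hw : 0 < w) : w ∣ pvAlign w q := by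
  have hlt := Nat.mod_lt q hw
  rcases Nat.eq_zero_or_pos (q % w) with h | h
  · have he : pvAlign w q = q := by simp [pvAlign, h, Nat.mod_self]
    rw [he]
    simpa [h] using Nat.dvd_sub_mod (n := w) q
  · have h2 : (w - q % w) % w = w - q % w := Nat.mod_eq_of_lt (by omega)
    have hmq : q % w ≤ q := Nat.mod_le q w
    have h3 : pvAlign w q = (q - q % w) + w := by unfold pvAlign; rw [h2]; omega
    rw [h3]
    exact Nat.dvd_add (Nat.dvd_sub_mod q) ⟨1, (Nat.mul_one w).symm⟩

theorem pvAlign_eq_of_dvd (w q : Nat) (h : w ∣ q) : pvAlign w q = q := by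
  have h0 : q % w = 0 := Nat.mod_eq_zero_of_dvd h
  simp [pvAlign, h0, Nat.mod_self]

theorem pvAlign_le_of_dvd (w q x : Nat) (hw : 0 < w) (hx : w ∣ x) (hq : q ≤ x) :
    pvAlign w q ≤ x := by
  obtain ⟨a, rfl⟩ := hx
  obtain ⟨b, hb⟩ := pvAlign_dvd w q hw
  have h1 : pvAlign w q < w * a + w := lt_of_lt_of_le (pvAlign_lt w q hw) (by omega)
  rw [hb] at h1 ⊢
  have hb1 : w * b < w * (a + 1) := by rw [Nat.mul_add, Nat.mul_one]; omega
  have hba : b < a + 1 := Nat.lt_of_mul_lt_mul_left hb1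
  exact Nat.mul_le_mul_left w (by omega)

-- the least multiple of w strictly above rn
theorem pv_next_multiple (w rn x : Nat) (hw : 0 < w) (hx : w ∣ x) (hgt : rn < x) :
    rn + (w - rn % w) ≤ x := by
  obtain ⟨t, rfl⟩ := hx
  have hdiv : rn / w < t := by
    by_contra hc
    have h0 : t ≤ rn / w := by omega
    have h1 : w * t ≤ w * (rn / w) := Nat.mul_le_mul_left w h0
    have h2 := Nat.mod_add_div rn w
    omega
  have h1 : w * (rn / w + 1) ≤ w * t := Nat.mul_le_mul_left w hdiv
  rw [Nat.mul_add, Nat.mul_one] at h1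
  have h2 := Nat.mod_add_div rn w
  have h3 := Nat.mod_lt rn hw
  omega

-- str.find(c, i) with an arbitrary int position equals find from the clamped position (c ≠ "")
theorem pv_findFrom_clamp (s cL : List Char) (hc : 0 < cL.length) (i : Int) :
    PySem.Chars.findFrom s cL i none =
      PySem.Chars.findFrom s cL ((PySem.List.clampIdx s.length i : Nat) : Int) none := by
  have hnil : PySem.Chars.find ([] : List Char) cL = -1 := by
    rw [PySem.Chars.find_eq_neg_one_iff]
    intro hinf
    have : cL = [] := List.eq_nil_of_infix_nil hinf
    simp [this] at hc
  simp only [PySem.Chars.findFrom, PySem.List.clampIdx]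
  by_cases h1 : i < 0
  · by_cases h2 : i + (s.length : Int) < 0
    · have h2' : (s.length : Int) + i < 0 := by omega
      simp only [if_pos h1, if_pos h2, if_pos h2']
      norm_num
    · have h2' : ¬ (s.length : Int) + i < 0 := by omega
      simp only [if_pos h1, if_neg h2, if_neg h2']
      have hcast : ((((s.length : Int) + i).toNat : Int)) = i + (s.length : Int) := by omega
      have hge : ¬ ((((s.length : Int) + i).toNat : Int)) < 0 := by omega
      rw [if_neg hge, hcast]
  · by_cases h3 : i ≤ (s.length : Int)
    · simp only [if_neg h1]
      have hge : ¬ ((min i.toNat s.length : Nat) : Int) < 0 := by omega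
      have hmin : (min i.toNat s.length : Nat) = i.toNat := by omega
      rw [if_neg hge, hmin]
      have : ((i.toNat : Nat) : Int) = i := by omega
      rw [this]
    · -- i past the end: LHS is -1 directly, RHS searches the empty remainder
      simp only [if_neg h1]
      have hmin : (min i.toNat s.length : Nat) = s.length := by omega
      rw [hmin]
      have hlt : (s.length : Int) < i := by omega
      rw [if_pos hlt]
      have hge : ¬ ((s.length : Nat) : Int) < 0 := by omega
      rw [if_neg hge]
      have hns : ¬ ((s.length : Int) < (s.length : Int)) := by omega
      rw [if_neg hns]
      have hdrop : List.drop ((s.length : Int)).toNat (List.take ((s.length : Int)).toNat s) = ([] : List Char) := by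
        simp
      rw [hdrop, hnil]
      simp

theorem pv_prefix_of_drop_infix (cL t : List Char) (r : Nat) (h : cL <+: t.drop r) : cL <:+: t :=
  h.isInfix.trans (List.drop_suffix r t).isInfix

-- find misses: no occurrence at any position ≥ k
theorem pv_no_occ (s cL : List Char) (k : Nat) (hk : k ≤ s.length)
    (h : PySem.Chars.findFrom s cL (k : Int) none = -1) :
    ∀ r, k ≤ r → ¬ cL <+: s.drop r := by
  intro r hr hpre
  rw [PySem.Chars.findFrom_natCast_eq_neg_one_iff s cL k hk] at h
  refine h (pv_prefix_of_drop_infix cL (s.drop k) (r - k) ?_)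
  have hk2 : k + (r - k) = r := by omega
  rw [List.drop_drop, hk2]
  exact hpre

-- an occurrence fits inside the string
theorem pv_occ_le (s cL : List Char) (r : Nat) (hc : 0 < cL.length) (h : cL <+: s.drop r) :
    r + cL.length ≤ s.length := by
  have h1 : cL.length ≤ (s.drop r).length := h.length_le
  rw [List.length_drop] at h1
  omega

-- B's slice test is the prefix test
theorem pv_slice_iff (s cL : List Char) (x : Nat) :
    PySem.List.slice s (some (x : Int)) (some ((x : Int) + (cL.length : Int))) = cL ↔
      cL <+: s.drop x := by
  rw [PySem.List.slice_natCast_add s x cL.length, List.prefix_iff_eq_take]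
  exact ⟨fun h => h.symm, fun h => h.symm⟩

-- loopBN exits immediately when j = maxIter or the window passes the end
theorem pvLoopBN_exit (s cL dL : List Char) (maxIter m j : Int) (p : Nat)
    (h : j = maxIter ∨ s.length < p + cL.length ∨ cL.length = 0) :
    pvLoopBN s cL dL maxIter m j p = m := by
  rw [pvLoopBN, dif_neg]
  rintro ⟨h1, h2, h3⟩
  rcases h with h | h | h
  · exact h1 h
  · omega
  · omega

-- loopA exits when its head condition fails
theorem pvLoopA_exit (s cL dL : List Char) (maxIter : Int) (fuel : Nat) (m j start : Int)
    (h : ¬ (0 < m ∧ j ≠ maxIter ∧ start ≠ -1)) :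
    pvLoopA s cL dL maxIter fuel m j start = m := by
  cases fuel with
  | zero => rfl
  | succ f => rw [pvLoopA]; rw [if_neg h]

-- one step of A's loop (definitional)
theorem pvLoopA_succ (s cL dL : List Char) (maxIter : Int) (fuel : Nat) (m j start : Int) :
    pvLoopA s cL dL maxIter (fuel + 1) m j start =
      if 0 < m ∧ j ≠ maxIter ∧ start ≠ -1 then
        if PySem.Chars.findFrom s cL (start + (cL.length : Int) - PySem.Int.mod start (cL.length : Int)) none ≠ -1 ∧
            PySem.Int.mod (PySem.Chars.findFrom s cL (start + (cL.length : Int) - PySem.Int.mod start (cL.length : Int)) none) (cL.length : Int) = 0 ∧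
            (PySem.Chars.findFrom s cL (start + (cL.length : Int) - PySem.Int.mod start (cL.length : Int)) none) * PySem.Int.truncdiv (dL.length : Int) (cL.length : Int) + (dL.length : Int) ≤ (s.length : Int) then
          if dL = PySem.List.slice s
              (some ((PySem.Chars.findFrom s cL (start + (cL.length : Int) - PySem.Int.mod start (cL.length : Int)) none) * PySem.Int.truncdiv (dL.length : Int) (cL.length : Int)))
              (some ((PySem.Chars.findFrom s cL (start + (cL.length : Int) - PySem.Int.mod start (cL.length : Int)) none) * PySem.Int.truncdiv (dL.length : Int) (cL.length : Int) + (dL.length : Int))) then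
            pvLoopA s cL dL maxIter fuel (m + 1) (j + 1)
              (PySem.Chars.findFrom s cL (start + (cL.length : Int) - PySem.Int.mod start (cL.length : Int)) none)
          else
            pvLoopA s cL dL maxIter fuel (m * (-1)) (j + 1)
              (PySem.Chars.findFrom s cL (start + (cL.length : Int) - PySem.Int.mod start (cL.length : Int)) none)
        else
          pvLoopA s cL dL maxIter fuel m j
            (PySem.Chars.findFrom s cL (start + (cL.length : Int) - PySem.Int.mod start (cL.length : Int)) none)
      else m := rfl

-- skipping k aligned non-matching positions
theorem pvLoopBN_skip (s cL dL : List Char) (maxIter m j : Int) (hw : 0 < cL.length)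
    (k p : Nat) (h : ∀ i < k, ¬ pvOcc s cL dL (p + i * cL.length)) :
    pvLoopBN s cL dL maxIter m j p = pvLoopBN s cL dL maxIter m j (p + k * cL.length) := by
  induction k generalizing p with
  | zero => simp
  | succ k ih =>
    by_cases hj : j = maxIter
    · rw [pvLoopBN_exit s cL dL maxIter m j p (Or.inl hj),
        pvLoopBN_exit s cL dL maxIter m j _ (Or.inl hj)]
    by_cases hn : p + cL.length ≤ s.length
    · have h0 : ¬ pvOcc s cL dL p := by simpa using h 0 (by omega)
      rw [pvOcc] at h0
      rw [pvLoopBN, dif_pos ⟨hj, hn, hw⟩, if_neg h0]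
      have hrest : ∀ i < k, ¬ pvOcc s cL dL (p + cL.length + i * cL.length) := by
        intro i hi
        have := h (i + 1) (by omega)
        have harith : p + (i + 1) * cL.length = p + cL.length + i * cL.length := by
          rw [Nat.add_mul, Nat.one_mul]; omega
        rwa [harith] at this
      rw [ih (p + cL.length) hrest]
      congr 1
      rw [Nat.add_mul, Nat.one_mul]; omega
    · rw [pvLoopBN_exit s cL dL maxIter m j p (Or.inr (Or.inl (by omega)))]
      have hk1 : cL.length ≤ (k + 1) * cL.length := Nat.le_mul_of_pos_left _ (by omega)
      rw [pvLoopBN_exit s cL dL maxIter m j _ (Or.inr (Or.inl (by omega)))]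

-- advance B's scan between two aligned positions with no checked occurrence between
theorem pvLoopBN_advance (s cL dL : List Char) (maxIter m j : Int) (hw : 0 < cL.length)
    (a b : Nat) (ha : cL.length ∣ a) (hb : cL.length ∣ b) (hab : a ≤ b)
    (hno : ∀ x, a ≤ x → x < b → cL.length ∣ x → ¬ pvOcc s cL dL x) :
    pvLoopBN s cL dL maxIter m j a = pvLoopBN s cL dL maxIter m j b := by
  have hd : cL.length ∣ b - a := Nat.dvd_sub hb ha
  obtain ⟨k, hk⟩ := hd
  have hb2 : b = a + k * cL.length := by rw [Nat.mul_comm] at hk; omega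
  rw [hb2]
  apply pvLoopBN_skip s cL dL maxIter m j hw
  intro i hi
  apply hno
  · omega
  · have : i * cL.length < k * cL.length := (Nat.mul_lt_mul_right hw).mpr hi
    omega
  · exact Nat.dvd_add ha ⟨i, Nat.mul_comm i cL.length⟩

-- when no occurrence exists at or beyond p, loopBN returns m
theorem pvLoopBN_none (s cL dL : List Char) (maxIter m j : Int) (hw : 0 < cL.length)
    (p : Nat) (h : ∀ r, p ≤ r → ¬ cL <+: s.drop r) :
    pvLoopBN s cL dL maxIter m j p = m := by
  have hstep : ∀ i < s.length + 1, ¬ pvOcc s cL dL (p + i * cL.length) := by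
    intro i _ hocc
    exact h _ (by omega) ((pv_slice_iff s cL _).mp hocc.1)
  rw [pvLoopBN_skip s cL dL maxIter m j hw (s.length + 1) p hstep]
  apply pvLoopBN_exit
  right; left
  have : s.length + 1 ≤ (s.length + 1) * cL.length := Nat.le_mul_of_pos_right _ hw
  omega

-- the main simulation: A's find loop from state (m, j, start) equals B's aligned scan
theorem pv_bridge (s cL dL : List Char) (maxIter : Int) (hw : 0 < cL.length) :
    ∀ (fuel : Nat) (m j start : Int), 0 < m → start ≠ -1 →
      s.length + 1 ≤ fuel + PySem.List.clampIdx s.length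
        (start + (cL.length : Int) - PySem.Int.mod start (cL.length : Int)) →
      pvLoopA s cL dL maxIter (fuel + 1) m j start =
        pvLoopBN s cL dL maxIter m j
          (pvAlign cL.length (PySem.List.clampIdx s.length
            (start + (cL.length : Int) - PySem.Int.mod start (cL.length : Int)))) := by
  intro fuel
  induction fuel with
  | zero =>
    intro m j start _ _ hf
    have := PySem.List.clampIdx_le s.length
      (start + (cL.length : Int) - PySem.Int.mod start (cL.length : Int))
    omega
  | succ f ih =>
    intro m j start hm hs hf
    set q := PySem.List.clampIdx s.length
      (start + (cL.length : Int) - PySem.Int.mod start (cL.length : Int)) with hqdef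
    have hq : q ≤ s.length := hqdef ▸ PySem.List.clampIdx_le _ _
    by_cases hj : j = maxIter
    · rw [pvLoopA_exit s cL dL maxIter (f + 1 + 1) m j start (by tauto),
        pvLoopBN_exit s cL dL maxIter m j _ (Or.inl hj)]
    rw [pvLoopA_succ, if_pos ⟨hm, hj, hs⟩]
    rw [pv_findFrom_clamp s cL hw, ← hqdef]
    by_cases hfound : PySem.Chars.findFrom s cL ((q : Nat) : Int) none = -1
    · rw [if_neg (by rw [hfound]; tauto)]
      rw [hfound, pvLoopA_exit s cL dL maxIter (f + 1) m j (-1) (by tauto)]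
      exact (pvLoopBN_none s cL dL maxIter m j hw (pvAlign cL.length q)
        (fun r' hr' => pv_no_occ s cL q hq hfound r'
          (le_trans (pvAlign_ge _ _) hr'))).symm
    obtain ⟨hge, hpre, hmin⟩ := PySem.Chars.findFrom_natCast_spec s cL q hq hfound
    set r := PySem.Chars.findFrom s cL ((q : Nat) : Int) none with hrdef
    have hr0 : (0 : Int) ≤ r := le_trans (by exact_mod_cast Int.natCast_nonneg q) hge
    have hrcast : ((r.toNat : Nat) : Int) = r := Int.toNat_of_nonneg hr0
    set rn := r.toNat with hrndef
    have hqrn : q ≤ rn := by omega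
    have hprern : cL <+: s.drop rn := hpre
    have hfit : rn + cL.length ≤ s.length := pv_occ_le s cL rn hw hprern
    by_cases hcond : PySem.Int.mod r (cL.length : Int) = 0 ∧
        r * PySem.Int.truncdiv (dL.length : Int) (cL.length : Int) + (dL.length : Int) ≤ (s.length : Int)
    · -- A checks this occurrence
      have halign : cL.length ∣ rn := by
        have hdv := (PySem.Int.mod_eq_zero_iff_dvd r (cL.length : Int)).mp hcond.1
        rw [← hrcast] at hdv
        exact_mod_cast hdv
      rw [if_pos ⟨hfound, hcond.1, hcond.2⟩]
      have hBreach : pvLoopBN s cL dL maxIter m j (pvAlign cL.length q) =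
          pvLoopBN s cL dL maxIter m j rn := by
        apply pvLoopBN_advance s cL dL maxIter m j hw _ _ (pvAlign_dvd _ _ hw) halign
          (pvAlign_le_of_dvd _ _ _ hw halign hqrn)
        intro x hx1 hx2 _ hocc
        exact hmin x (le_trans (pvAlign_ge _ _) hx1) hx2 ((pv_slice_iff s cL x).mp hocc.1)
      rw [hBreach]
      have hsliceB : PySem.List.slice s (some ((rn : Nat) : Int))
          (some (((rn : Nat) : Int) + (cL.length : Int))) = cL :=
        (pv_slice_iff s cL rn).mpr hprern
      have hrangeB : ((rn : Nat) : Int) * PySem.Int.truncdiv (dL.length : Int) (cL.length : Int)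
          + (dL.length : Int) ≤ (s.length : Int) := by rw [hrcast]; exact hcond.2
      rw [pvLoopBN, dif_pos (And.intro hj (And.intro hfit hw)),
        if_pos (And.intro hsliceB hrangeB)]
      rw [← hrcast]
      by_cases himg : dL = PySem.List.slice s
          (some ((rn : Int) * PySem.Int.truncdiv (dL.length : Int) (cL.length : Int)))
          (some ((rn : Int) * PySem.Int.truncdiv (dL.length : Int) (cL.length : Int) + (dL.length : Int)))
      · rw [if_pos himg, if_pos himg]
        have hmodz : PySem.Int.mod ((rn : Int)) (cL.length : Int) = 0 := by
          rw [PySem.Int.mod_eq_zero_iff_dvd]; exact_mod_cast halign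
        have hnp : (rn : Int) + (cL.length : Int) - PySem.Int.mod ((rn : Int)) (cL.length : Int)
            = (((rn + cL.length : Nat) : Nat) : Int) := by rw [hmodz]; push_cast; ring
        have hstep := ih (m + 1) (j + 1) ((rn : Nat) : Int) (by omega) (by omega) ?_
        · rw [hstep]
          congr 1
          rw [hnp, PySem.List.clampIdx_natCast]
          have hmin2 : min (rn + cL.length) s.length = rn + cL.length := by omega
          rw [hmin2, pvAlign_eq_of_dvd _ _ (Nat.dvd_add halign dvd_rfl)]
        · rw [hnp, PySem.List.clampIdx_natCast]
          have hmin2 : min (rn + cL.length) s.length = rn + cL.length := by omega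
          rw [hmin2]; omega
      · rw [if_neg himg, if_neg himg]
        rw [pvLoopA_exit s cL dL maxIter (f + 1) (m * (-1)) (j + 1) _ (by
          intro hcon
          have := hcon.1
          omega)]
        omega
    · -- A skips this occurrence (unaligned, or image out of range)
      rw [if_neg (by
        intro hcon
        exact hcond ⟨hcon.2.1, hcon.2.2⟩)]
      rw [← hrcast]
      have hmodc : PySem.Int.mod ((rn : Int)) (cL.length : Int) = ((rn % cL.length : Nat) : Int) := by
        simp
      have hmlt : rn % cL.length < cL.length := Nat.mod_lt rn hw
      have hnp : (rn : Int) + (cL.length : Int) - PySem.Int.mod ((rn : Int)) (cL.length : Int)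
          = ((rn + (cL.length - rn % cL.length) : Nat) : Int) := by
        rw [hmodc]; push_cast [le_of_lt hmlt]; ring
      have hPdvd : cL.length ∣ rn + (cL.length - rn % cL.length) := by
        have hPe : rn + (cL.length - rn % cL.length) = (rn - rn % cL.length) + cL.length := by
          have := Nat.mod_le rn cL.length; omega
        rw [hPe]
        exact Nat.dvd_add (Nat.dvd_sub_mod rn) dvd_rfl
      -- refute B's check at any aligned position between pvAlign q and the new scan start
      have hno : ∀ x, pvAlign cL.length q ≤ x → x < rn + (cL.length - rn % cL.length) →
          cL.length ∣ x → ¬ pvOcc s cL dL x := by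
        intro x hx1 hx2 hdx hocc
        rcases lt_trichotomy x rn with hlt | heq | hgt
        · exact hmin x (le_trans (pvAlign_ge _ _) hx1) hlt ((pv_slice_iff s cL x).mp hocc.1)
        · apply hcond
          constructor
          · rw [← hrcast, PySem.Int.mod_eq_zero_iff_dvd]
            exact_mod_cast (heq ▸ hdx)
          · rw [← hrcast, ← heq]; exact hocc.2
        · have := pv_next_multiple cL.length rn x hw hdx hgt
          omega
      have hstep := ih m j ((rn : Nat) : Int) hm (by omega) ?_
      · rw [hstep]
        rw [hnp, PySem.List.clampIdx_natCast]
        by_cases hP : rn + (cL.length - rn % cL.length) ≤ s.length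
        · have hminP : min (rn + (cL.length - rn % cL.length)) s.length
              = rn + (cL.length - rn % cL.length) := by omega
          rw [hminP, pvAlign_eq_of_dvd _ _ hPdvd]
          exact (pvLoopBN_advance s cL dL maxIter m j hw _ _ (pvAlign_dvd _ _ hw) hPdvd
            (pvAlign_le_of_dvd _ _ _ hw hPdvd (by omega)) hno).symm
        · have hminP : min (rn + (cL.length - rn % cL.length)) s.length = s.length := by omega
          rw [hminP]
          rw [pvLoopBN_exit s cL dL maxIter m j (pvAlign cL.length s.length)
            (Or.inr (Or.inl (by have := pvAlign_ge cL.length s.length; omega)))]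
          have hstep2 : ∀ i < s.length + 1,
              ¬ pvOcc s cL dL (pvAlign cL.length q + i * cL.length) := by
            intro i _ hocc
            have hdx : cL.length ∣ pvAlign cL.length q + i * cL.length :=
              Nat.dvd_add (pvAlign_dvd _ _ hw) ⟨i, Nat.mul_comm i _⟩
            have hxfit : (pvAlign cL.length q + i * cL.length) + cL.length ≤ s.length :=
              pv_occ_le s cL _ hw ((pv_slice_iff s cL _).mp hocc.1)
            exact hno _ (by omega) (by omega) hdx hocc
          rw [pvLoopBN_skip s cL dL maxIter m j hw (s.length + 1) _ hstep2]
          rw [pvLoopBN_exit s cL dL maxIter m j _ (Or.inr (Or.inl (by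
            have := Nat.le_mul_of_pos_right (s.length + 1) hw
            omega)))]
      · rw [hnp, PySem.List.clampIdx_natCast]
        have hle := min_le_right (rn + (cL.length - rn % cL.length)) s.length
        have hge2 : rn + 1 ≤ min (rn + (cL.length - rn % cL.length)) s.length := by
          have h5 := Nat.mod_le rn cL.length
          omega
        omega

-- ===== VERDICT (by name: the statement is the Claim_ definition above) =====
theorem checkMorphismEntry_spec : Claim_equal_checkMorphismEntry := by
  unfold Claim_equal_checkMorphismEntry
  intro seq c d start maxIter hdom hpre
  unfold Spec_checkMorphismEntry
  unfold Pre_checkMorphismEntry at hpre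
  have hw : 0 < c.toList.length := by
    rcases Nat.eq_zero_or_pos c.toList.length with h | h
    · exact absurd (String.toList_eq_nil_iff.mp (List.eq_nil_of_length_eq_zero h)) hpre.1
    · exact h
  by_cases hs1 : start = -1
  · simp only [checkMorphismEntry, checkMorphismEntry_alt, if_pos hs1]
    exact pvLoopA_exit _ _ _ _ _ 1 0 start (by simp [hs1])
  simp only [checkMorphismEntry, checkMorphismEntry_alt, if_neg hs1]
  have hstart : 0 ≤ start := by
    rcases hpre.2.lt_or_eq with h | h
    · omega
    · exact absurd h.symm hs1
  set w : Nat := c.toList.length with hwdef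
  set len : Nat := seq.toList.length with hlendef
  have hmod0 : 0 ≤ PySem.Int.mod start (w : Int) := PySem.Int.mod_nonneg _ (by exact_mod_cast hw)
  have hmodlt : PySem.Int.mod start (w : Int) < (w : Int) := PySem.Int.mod_lt _ (by exact_mod_cast hw)
  set p : Int := start - PySem.Int.mod start (w : Int) + (w : Int) with hpdef
  have hp0 : 0 ≤ p := by omega
  have hpeq : start + (w : Int) - PySem.Int.mod start (w : Int) = p := by omega
  have hdvdI : (w : Int) ∣ p := by
    have hme : PySem.Int.mod start (w : Int) = start % (w : Int) :=
      PySem.Int.mod_eq_emod_of_pos (by exact_mod_cast hw)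
    have hde := Int.ediv_add_emod start (w : Int)
    exact ⟨start / (w : Int) + 1, by rw [hpdef, hme]; ring_nf; omega⟩
  have hdvdN : w ∣ p.toNat := by
    have : (w : Int) ∣ ((p.toNat : Nat) : Int) := by rwa [Int.toNat_of_nonneg hp0]
    exact_mod_cast this
  have hbr := pv_bridge seq.toList c.toList d.toList maxIter hw
    (seq.toList.length + 1) 1 0 start one_pos hs1 (by omega)
  rw [hpeq] at hbr
  have hBnat : pvLoopB seq.toList c.toList d.toList maxIter 1 0 p =
      pvLoopBN seq.toList c.toList d.toList maxIter 1 0 p.toNat := by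
    have := pvLoopB_eq_nat seq.toList c.toList d.toList maxIter len 1 0 p.toNat (by omega)
    rwa [Int.toNat_of_nonneg hp0] at this
  rw [hBnat, hbr]
  by_cases hle : p ≤ (len : Int)
  · have hcl : PySem.List.clampIdx seq.toList.length p = p.toNat := by
      rw [PySem.List.clampIdx]
      split_ifs <;> omega
    rw [hcl, pvAlign_eq_of_dvd _ _ hdvdN]
  · have hcl : PySem.List.clampIdx seq.toList.length p = len := by
      rw [PySem.List.clampIdx]
      split_ifs <;> omega
    rw [hcl]
    rw [pvLoopBN_exit seq.toList c.toList d.toList maxIter 1 0 (pvAlign w len)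
      (Or.inr (Or.inl (by have := pvAlign_ge w len; omega)))]
    rw [pvLoopBN_exit seq.toList c.toList d.toList maxIter 1 0 p.toNat
      (Or.inr (Or.inl (by omega)))]
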